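-- pv_equiv track=rewrite | github.com/Edmilson-Ribeiro/FatecVotorantim | Algoritmos_Piva/Aula16/EX01.py | calculo_patosecoelhos
-- ===== SOURCE A (Python) =====
-- def calculo_patosecoelhos(total_cabecas, total_pes):
--     patos = 0
--     coelhos = 0
--
--     for p in range(total_cabecas + 1):
--         c = total_cabecas - p
--         if 2*p + 4*c == total_pes:
--             patos = p
--             coelhos = c
--             break
--     return patos, coelhos
-- ===== SOURCE B (Python) =====
-- def calculo_patosecoelhos(total_cabecas, total_pes):
--     # Solve p + c = heads, 2p + 4c = legs directly: c = (legs - 2*heads) / 2.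
--     resto = total_pes - 2 * total_cabecas
--     if resto % 2 == 0:
--         coelhos = resto // 2
--         if 0 <= coelhos <= total_cabecas:
--             return total_cabecas - coelhos, coelhos
--     return 0, 0
-- ===== Notes on version B (the rewrite author's own statement) =====
-- stated objective: faster
-- what changed: Replaced the linear scan over all candidate duck counts with the closed-form solution of the two linear equations (c = (legs - 2*heads)/2) plus an integrality/range check.
import Mathlib
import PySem

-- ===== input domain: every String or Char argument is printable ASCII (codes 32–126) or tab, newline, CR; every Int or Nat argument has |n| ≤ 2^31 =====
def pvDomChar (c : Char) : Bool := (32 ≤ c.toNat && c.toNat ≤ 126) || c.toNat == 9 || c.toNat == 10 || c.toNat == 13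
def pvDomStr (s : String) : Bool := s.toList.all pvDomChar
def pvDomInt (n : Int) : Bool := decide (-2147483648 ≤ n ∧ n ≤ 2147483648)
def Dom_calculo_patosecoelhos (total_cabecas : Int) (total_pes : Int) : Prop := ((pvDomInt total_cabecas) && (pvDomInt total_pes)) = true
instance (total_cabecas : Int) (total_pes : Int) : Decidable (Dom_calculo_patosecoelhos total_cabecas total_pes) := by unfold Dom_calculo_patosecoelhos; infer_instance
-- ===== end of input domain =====

-- B replaces A's linear scan over candidate duck counts by the O(1) closed-form solution
-- of the two linear equations, with an integrality and range check (objective: faster).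

-- ===== PORT A =====
-- the for-loop with break: scan the range, stop at the first p with 2*p + 4*c == total_pes
def pvLoopA (cab pes : Int) : List Int → Int × Int
  | [] => (0, 0)
  | p :: rest =>
    let c := cab - p
    if 2 * p + 4 * c = pes then (p, c) else pvLoopA cab pes rest

def calculo_patosecoelhos (total_cabecas : Int) (total_pes : Int) : List Int :=
  let r := pvLoopA total_cabecas total_pes (PySem.List.pyRange 0 (total_cabecas + 1) 1)
  [r.1, r.2]

-- ===== PORT B =====
def calculo_patosecoelhos_alt (total_cabecas : Int) (total_pes : Int) : List Int :=
  let resto := total_pes - 2 * total_cabecas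
  if PySem.Int.mod resto 2 = 0 then
    let coelhos := PySem.Int.floordiv resto 2
    if 0 ≤ coelhos ∧ coelhos ≤ total_cabecas then
      [total_cabecas - coelhos, coelhos]
    else [0, 0]
  else [0, 0]

-- ===== PRECONDITION & SPEC =====
def Spec_calculo_patosecoelhos (total_cabecas : Int) (total_pes : Int) (out : List Int) : Prop := out = calculo_patosecoelhos_alt total_cabecas total_pes
instance (total_cabecas : Int) (total_pes : Int) (out : List Int) : Decidable (Spec_calculo_patosecoelhos total_cabecas total_pes out) := by unfold Spec_calculo_patosecoelhos; infer_instance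

-- ===== CLAIM (what is proved, stated in full; the proofs are below) =====
def Claim_equal_calculo_patosecoelhos : Prop := ∀ (total_cabecas : Int) (total_pes : Int), Dom_calculo_patosecoelhos total_cabecas total_pes → Spec_calculo_patosecoelhos total_cabecas total_pes (calculo_patosecoelhos total_cabecas total_pes)

-- ===== LEMMAS AND PROOFS =====

-- if no element of the list satisfies the loop's test, the loop falls through to (0, 0)
theorem pvLoopA_none (cab pes : Int) (l : List Int)
    (h : ∀ p ∈ l, 2 * p + 4 * (cab - p) ≠ pes) : pvLoopA cab pes l = (0, 0) := by
  induction l with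
  | nil => rfl
  | cons p rest ih =>
    simp only [pvLoopA]
    rw [if_neg (h p (by simp))]
    exact ih (fun q hq => h q (by simp [hq]))

-- the test 2*p + 4*(cab-p) = pes determines p uniquely, so the first hit is THE hit
theorem pvLoopA_found (cab pes p0 : Int) (l : List Int)
    (hmem : p0 ∈ l) (hsol : 2 * p0 + 4 * (cab - p0) = pes) :
    pvLoopA cab pes l = (p0, cab - p0) := by
  induction l with
  | nil => cases hmem
  | cons p rest ih =>
    simp only [pvLoopA]
    by_cases hp : 2 * p + 4 * (cab - p) = pes
    · rw [if_pos hp]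
      have : p = p0 := by omega
      subst this; rfl
    · rw [if_neg hp]
      have hne : p0 ≠ p := fun h => hp (h ▸ hsol)
      exact ih ((List.mem_cons.mp hmem).resolve_left hne)

-- ===== VERDICT (by name: the statement is the Claim_ definition above) =====
theorem calculo_patosecoelhos_spec : Claim_equal_calculo_patosecoelhos := by
  intro cab pes _
  unfold Spec_calculo_patosecoelhos calculo_patosecoelhos calculo_patosecoelhos_alt
  set resto := pes - 2 * cab with hresto
  by_cases hmod : PySem.Int.mod resto 2 = 0
  · have hdvd : (2 : Int) ∣ resto := (PySem.Int.mod_eq_zero_iff_dvd resto 2).mp hmod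
    obtain ⟨c, hc⟩ := hdvd
    have hfd : PySem.Int.floordiv resto 2 = c := by
      rw [PySem.Int.floordiv_eq_iff_of_pos (by norm_num)]; omega
    by_cases hrange : 0 ≤ c ∧ c ≤ cab
    · have hsol : 2 * (cab - c) + 4 * (cab - (cab - c)) = pes := by omega
      have hmem : cab - c ∈ PySem.List.pyRange 0 (cab + 1) 1 := by
        rw [PySem.List.mem_pyRange_one]; omega
      simp only [pvLoopA_found cab pes (cab - c) _ hmem hsol, hmod, hfd, hrange,
        if_pos, and_self]
      simp only [List.cons.injEq, and_true]
      exact ⟨trivial, by omega⟩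
    · have hnone : ∀ p ∈ PySem.List.pyRange 0 (cab + 1) 1,
          2 * p + 4 * (cab - p) ≠ pes := by
        intro p hp hsol
        rw [PySem.List.mem_pyRange_one] at hp
        exact hrange ⟨by omega, by omega⟩
      simp only [pvLoopA_none cab pes _ hnone, hmod, hfd, hrange, if_pos, if_false]
  · have hnone : ∀ p ∈ PySem.List.pyRange 0 (cab + 1) 1,
        2 * p + 4 * (cab - p) ≠ pes := by
      intro p hp hsol
      apply hmod
      rw [PySem.Int.mod_eq_zero_iff_dvd]
      exact ⟨cab - p, by omega⟩
    simp only [pvLoopA_none cab pes _ hnone, hmod, if_false]
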